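-- pv_equiv track=rewrite | github.com/MintYiqingchen/pyspark-crf | dataUtils.py | tagForSentence
-- ===== SOURCE A (Python) =====
-- def tagForSentence(tokens):
--     '''@tokens: List[token]
--     return: @[Char,Tag]
--     '''
--     res = []
--     for token in tokens:
--         if len(token)==1:
--             tag = ['S']
--         else:
--             tag = ['B']+['M']*(len(token)-2)+['E']
--         res.extend([(c,t) for c,t in zip(token, tag)])
--     return res
-- ===== SOURCE B (Python) =====
-- def tagForSentence(tokens):
--     '''@tokens: List[token]
--     return: @[Char,Tag]
--     '''
--     starts = set()
--     ends = set()
--     pos = 0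
--     for t in tokens:
--         if t:
--             starts.add(pos)
--             ends.add(pos + len(t) - 1)
--             pos += len(t)
--     res = []
--     for i, c in enumerate(''.join(tokens)):
--         if i in starts:
--             tag = 'S' if i in ends else 'B'
--         elif i in ends:
--             tag = 'E'
--         else:
--             tag = 'M'
--         res.append((c, tag))
--     return res
-- ===== Notes on version B (the rewrite author's own statement) =====
-- stated objective: alternative
-- what changed: B first computes the token-boundary positions (start/end index sets over the flattened character stream) in one pass, then tags the concatenated character stream in a second pass purely by membership in those boundary sets; no per-token tag list, no zip, no per-token inner tagging loop.
import Mathlib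
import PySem

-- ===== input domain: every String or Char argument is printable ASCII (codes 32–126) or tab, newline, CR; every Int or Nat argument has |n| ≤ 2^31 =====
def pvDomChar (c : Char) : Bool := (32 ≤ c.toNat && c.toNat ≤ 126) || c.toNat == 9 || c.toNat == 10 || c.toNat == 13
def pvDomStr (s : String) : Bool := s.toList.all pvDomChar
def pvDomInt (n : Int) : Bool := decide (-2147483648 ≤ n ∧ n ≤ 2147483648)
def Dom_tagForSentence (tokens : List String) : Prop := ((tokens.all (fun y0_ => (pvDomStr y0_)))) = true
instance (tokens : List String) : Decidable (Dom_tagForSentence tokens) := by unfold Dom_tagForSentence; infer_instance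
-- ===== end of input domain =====

-- B replaces A's per-token tag-list + zip by a two-stage algorithm: one pass collects the
-- token start/end positions over the flattened character stream into sets, a second pass tags
-- the concatenated characters purely by membership in those boundary sets; objective: alternative.

-- ===== PORT A =====
-- A: per token build tag = ['S'] or ['B']+['M']*(n-2)+['E'], then extend res with zip(token, tag)
def tagA_token (token : String) : List (String × String) :=
  let tag : List String :=
    if token.toList.length = 1 then ["S"]
    else ["B"] ++ List.replicate (token.toList.length - 2) "M" ++ ["E"]
  (token.toList.zip tag).map (fun p => (String.ofList [p.1], p.2))

def tagForSentence (tokens : List String) : List (String × String) :=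
  tokens.foldl (fun res token => res ++ tagA_token token) []

-- ===== PORT B =====
-- B stage 1: for t in tokens: if t: starts.add(pos); ends.add(pos+len(t)-1); pos += len(t)
-- B stage 2: for i, c in enumerate(''.join(tokens)): tag by membership in starts/ends
def tagForSentence_alt (tokens : List String) : List (String × String) :=
  let st : PySem.Set Int × PySem.Set Int × Int :=
    tokens.foldl (fun acc t =>
      if t.toList ≠ [] then
        (PySem.Set.add acc.1 acc.2.2,
         PySem.Set.add acc.2.1 (acc.2.2 + (t.toList.length : Int) - 1),
         acc.2.2 + (t.toList.length : Int))
      else acc) (PySem.Set.empty, PySem.Set.empty, 0)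
  let starts := st.1
  let ends := st.2.1
  (PySem.List.enumerate (tokens.map String.toList).flatten 0).foldl (fun res p =>
    res ++ [(String.ofList [p.2],
      if PySem.Set.contains starts p.1 then
        (if PySem.Set.contains ends p.1 then "S" else "B")
      else if PySem.Set.contains ends p.1 then "E"
      else "M")]) []

-- ===== PRECONDITION & SPEC =====
def Spec_tagForSentence (tokens : List String) (out : List (String × String)) : Prop := out = tagForSentence_alt tokens
instance (tokens : List String) (out : List (String × String)) : Decidable (Spec_tagForSentence tokens out) := by unfold Spec_tagForSentence; infer_instance

-- ===== CLAIM (what is proved, stated in full; the proofs are below) =====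
def Claim_equal_tagForSentence : Prop := ∀ (tokens : List String), Dom_tagForSentence tokens → Spec_tagForSentence tokens (tagForSentence tokens)

-- ===== LEMMAS AND PROOFS =====

-- proof-only model of stage 1: the start/end boundary positions of the tokens from offset pos
def bnds : List String → Int → List Int × List Int
  | [], _ => ([], [])
  | t :: ts, pos =>
    if t.toList = [] then bnds ts pos
    else
      let r := bnds ts (pos + (t.toList.length : Int))
      (pos :: r.1, (pos + (t.toList.length : Int) - 1) :: r.2)

theorem bnds_lb (ts : List String) (pos : Int) :
    (∀ x ∈ (bnds ts pos).1, pos ≤ x) ∧ (∀ x ∈ (bnds ts pos).2, pos ≤ x) := by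
  induction ts generalizing pos with
  | nil => simp [bnds]
  | cons t ts ih =>
    by_cases h : t.toList = []
    · simpa [bnds, h] using ih pos
    · have hn : 0 < t.toList.length := List.length_pos_of_ne_nil h
      have ih' := ih (pos + (t.toList.length : Int))
      constructor
      · intro x hx
        simp only [bnds] at hx
        rw [if_neg h] at hx
        simp only [List.mem_cons] at hx
        rcases hx with rfl | hx
        · omega
        · have := ih'.1 x hx; omega
      · intro x hx
        simp only [bnds] at hx
        rw [if_neg h] at hx
        simp only [List.mem_cons] at hx
        rcases hx with rfl | hx
        · omega
        · have := ih'.2 x hx; omega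

-- stage 1's fold computes the boundary lists (sets stay duplicate-free because positions grow)
theorem fold_sets (ts : List String) (pos : Int) (S E : PySem.Set Int)
    (hS : ∀ x ∈ S, x < pos) (hE : ∀ x ∈ E, x < pos) :
    ts.foldl (fun acc t =>
      if t.toList ≠ [] then
        (PySem.Set.add acc.1 acc.2.2,
         PySem.Set.add acc.2.1 (acc.2.2 + (t.toList.length : Int) - 1),
         acc.2.2 + (t.toList.length : Int))
      else acc) (S, E, pos)
    = (S ++ (bnds ts pos).1, E ++ (bnds ts pos).2,
       pos + (ts.map (fun t => (t.toList.length : Int))).sum) := by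
  induction ts generalizing pos S E with
  | nil => simp [bnds]
  | cons t ts ih =>
    by_cases h : t.toList = []
    · rw [List.foldl_cons, if_neg (not_not_intro h)]
      rw [ih pos S E hS hE]
      have hb : bnds (t :: ts) pos = bnds ts pos := by
        simp only [bnds]; rw [if_pos h]
      rw [hb]
      simp [String.toList_eq_nil_iff.mp h]
    · have hn : 0 < t.toList.length := List.length_pos_of_ne_nil h
      have hlen := @String.length_toList t
      have hpS : pos ∉ S := fun hm => absurd (hS pos hm) (by omega)
      have hpE : pos + (t.toList.length : Int) - 1 ∉ E :=
        fun hm => absurd (hE _ hm) (by omega)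
      rw [List.foldl_cons, if_pos h]
      rw [PySem.Set.add_of_not_mem hpS, PySem.Set.add_of_not_mem hpE]
      rw [ih (pos + (t.toList.length : Int)) (S ++ [pos])
        (E ++ [pos + (t.toList.length : Int) - 1])
        (by intro x hx
            rcases List.mem_append.mp hx with hx | hx
            · have := hS x hx; omega
            · simp at hx; omega)
        (by intro x hx
            rcases List.mem_append.mp hx with hx | hx
            · have := hE x hx; omega
            · simp at hx; omega)]
      have hb : bnds (t :: ts) pos
          = (pos :: (bnds ts (pos + (t.toList.length : Int))).1,
             (pos + (t.toList.length : Int) - 1) ::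
               (bnds ts (pos + (t.toList.length : Int))).2) := by
        simp only [bnds]; rw [if_neg h]
      rw [hb]
      simp only [List.map_cons, List.sum_cons]
      have hlen := @String.length_toList t
      refine Prod.ext ?_ (Prod.ext ?_ ?_)
      · simp
      · simp
      · simp; omega

-- the per-token segment of B's second pass equals A's per-token tags,
-- given that boundary membership within the segment is exactly {pos} / {pos+n-1}
theorem token_seg (t : String) (pos : Int)
    (S E : PySem.Set Int)
    (hS : ∀ k : Nat, k < t.toList.length →
      (PySem.Set.contains S (pos + k) = true ↔ (k : Int) = 0))
    (hE : ∀ k : Nat, k < t.toList.length →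
      (PySem.Set.contains E (pos + k) = true ↔ (pos + k = pos + (t.toList.length : Int) - 1))) :
    (PySem.List.enumerate t.toList pos).map (fun p =>
      (String.ofList [p.2],
        if PySem.Set.contains S p.1 then
          (if PySem.Set.contains E p.1 then "S" else "B")
        else if PySem.Set.contains E p.1 then "E"
        else "M"))
    = tagA_token t := by
  unfold tagA_token
  apply List.ext_getElem
  · rcases ht : t.toList with _ | ⟨c, cs⟩
    · simp
    · rcases cs with _ | ⟨d, cs'⟩ <;> simp [List.length_zip]
  · intro k h1 h2
    have hk : k < t.toList.length := by
      simpa [PySem.List.length_enumerate] using h1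
    simp only [List.getElem_map, PySem.List.getElem_enumerate, List.getElem_zip]
    have hSk := hS k hk
    have hEk := hE k hk
    by_cases h1' : t.toList.length = 1
    · have hk0 : k = 0 := by omega
      subst hk0
      rw [hSk.mpr (by simp), if_pos rfl]
      rw [hEk.mpr (by omega), if_pos rfl]
      simp [h1']
    · simp only [if_neg h1']
      by_cases hk0 : k = 0
      · subst hk0
        rw [hSk.mpr (by simp), if_pos rfl]
        have hEf : PySem.Set.contains E (pos + ((0 : Nat) : Int)) = false := by
          apply Bool.eq_false_iff.mpr
          intro hh
          have := hEk.mp hh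
          omega
        rw [hEf]
        simp
      · have hSf : PySem.Set.contains S (pos + (k : Int)) = false := by
          apply Bool.eq_false_iff.mpr
          intro hh
          have := hSk.mp hh
          omega
        rw [hSf]
        simp only [Bool.false_eq_true, if_false, List.singleton_append]
        by_cases hkl : k = t.toList.length - 1
        · have hEt : PySem.Set.contains E (pos + (k : Int)) = true := by
            rw [hEk]; omega
          rw [hEt, if_pos rfl]
          rw [List.getElem_append_right (by
            have hlen := @String.length_toList t; simp; omega)]
          simp
        · have hEf : PySem.Set.contains E (pos + (k : Int)) = false := by
            apply Bool.eq_false_iff.mpr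
            intro hh
            have := hEk.mp hh
            omega
          rw [hEf]
          simp only [Bool.false_eq_true, if_false]
          rw [List.getElem_append_left (by
            have hlen := @String.length_toList t; simp; omega)]
          simp [List.getElem_cons, hk0]

-- B's second pass over the suffix 'ts' flattened, started at offset pos,
-- given sets whose membership at positions ≥ pos agrees with bnds ts pos
theorem main_map (ts : List String) (pos : Int)
    (S E : PySem.Set Int)
    (hS : ∀ i : Int, pos ≤ i → (PySem.Set.contains S i = true ↔ i ∈ (bnds ts pos).1))
    (hE : ∀ i : Int, pos ≤ i → (PySem.Set.contains E i = true ↔ i ∈ (bnds ts pos).2)) :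
    (PySem.List.enumerate (ts.map String.toList).flatten pos).map (fun p =>
      (String.ofList [p.2],
        if PySem.Set.contains S p.1 then
          (if PySem.Set.contains E p.1 then "S" else "B")
        else if PySem.Set.contains E p.1 then "E"
        else "M"))
    = ts.flatMap tagA_token := by
  induction ts generalizing pos with
  | nil => simp
  | cons t ts ih =>
    simp only [List.map_cons, List.flatten_cons, List.flatMap_cons]
    rw [PySem.List.enumerate_append, List.map_append]
    by_cases h : t.toList = []
    · have hb : bnds (t :: ts) pos = bnds ts pos := by
        simp only [bnds]; rw [if_pos h]
      rw [h]
      simp only [PySem.List.enumerate_nil, List.map_nil, List.length_nil,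
        Int.natCast_zero, add_zero, List.nil_append]
      rw [ih pos (fun i hi => hb ▸ hS i hi) (fun i hi => hb ▸ hE i hi)]
      simp [tagA_token, h]
    · have hn : 0 < t.toList.length := List.length_pos_of_ne_nil h
      have hb : bnds (t :: ts) pos
          = (pos :: (bnds ts (pos + (t.toList.length : Int))).1,
             (pos + (t.toList.length : Int) - 1) ::
               (bnds ts (pos + (t.toList.length : Int))).2) := by
        simp only [bnds]; rw [if_neg h]
      have hlb := bnds_lb ts (pos + (t.toList.length : Int))
      rw [token_seg t pos S E
        (by intro k hk
            rw [hS (pos + k) (by omega), hb]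
            simp only [List.mem_cons]
            constructor
            · rintro (he | hm)
              · omega
              · have := hlb.1 _ hm
                exfalso; omega
            · intro hk0
              left; omega)
        (by intro k hk
            rw [hE (pos + k) (by omega), hb]
            simp only [List.mem_cons]
            constructor
            · rintro (he | hm)
              · omega
              · have := hlb.2 _ hm
                exfalso; omega
            · intro heq
              left; omega)]
      rw [ih (pos + (t.toList.length : Int))
        (by intro i hi
            rw [hS i (by omega), hb]
            simp only [List.mem_cons]
            constructor
            · rintro (he | hm)
              · exfalso; omega
              · exact hm
            · exact fun hm => Or.inr hm)
        (by intro i hi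
            rw [hE i (by omega), hb]
            simp only [List.mem_cons]
            constructor
            · rintro (he | hm)
              · exfalso; omega
              · exact hm
            · exact fun hm => Or.inr hm)]

-- A's fold is the flatMap of the per-token tags
theorem a_eq_flatMap (tokens : List String) :
    tagForSentence tokens = tokens.flatMap tagA_token := by
  unfold tagForSentence
  induction tokens using List.reverseRecOn with
  | nil => simp
  | append_singleton ts t ih => simp [ih]

-- ===== VERDICT (by name: the statement is the Claim_ definition above) =====
theorem tagForSentence_spec : Claim_equal_tagForSentence := by
  intro tokens _
  unfold Spec_tagForSentence
  rw [a_eq_flatMap]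
  show tokens.flatMap tagA_token = tagForSentence_alt tokens
  unfold tagForSentence_alt
  have hfold := fold_sets tokens 0 PySem.Set.empty PySem.Set.empty
    (by intro x hx; simp [PySem.Set.empty] at hx)
    (by intro x hx; simp [PySem.Set.empty] at hx)
  rw [hfold]
  simp only [PySem.Set.empty, List.nil_append]
  rw [PySem.List.foldl_append_singleton_eq_map]
  have hm := main_map tokens 0 (bnds tokens 0).1 (bnds tokens 0).2
    (fun i _ => PySem.Set.contains_iff _ _)
    (fun i _ => PySem.Set.contains_iff _ _)
  simp only [List.nil_append]
  exact hm.symm
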